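-- pv_equiv track=rewrite | github.com/cocomikes/apk-signature | apk_signature/formatter.py | _format_fingerprint
-- ===== SOURCE A (Python) =====
-- def _format_fingerprint(fp: str, style: str) -> str:
--     """格式化指纹"""
--     if style == 'colon-upper':
--         # 转换为大写并添加冒号分隔
--         fp = fp.upper()
--         return ':'.join([fp[i:i+2] for i in range(0, len(fp), 2)])
--     elif style == 'colon-lower':
--         fp = fp.lower()
--         return ':'.join([fp[i:i+2] for i in range(0, len(fp), 2)])
--     elif style == 'upper':
--         return fp.upper()
--     elif style == 'lower':
--         return fp.lower()
--     return fp
-- ===== SOURCE B (Python) =====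
-- def _format_fingerprint(fp: str, style: str) -> str:
--     """Format fingerprint: single left-to-right pass for the colon styles."""
--     if style == 'colon-upper' or style == 'colon-lower':
--         cased = fp.upper() if style == 'colon-upper' else fp.lower()
--         out = []
--         for i, c in enumerate(cased):
--             if i > 0 and i % 2 == 0:
--                 out.append(':')
--             out.append(c)
--         return ''.join(out)
--     if style == 'upper':
--         return fp.upper()
--     if style == 'lower':
--         return fp.lower()
--     return fp
-- ===== Notes on version B (the rewrite author's own statement) =====
-- stated objective: alternative
-- what changed: The colon styles are built by one enumerate pass that inserts ':' before every even position > 0, instead of index-slicing the string into pairs and joining them.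
import Mathlib
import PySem

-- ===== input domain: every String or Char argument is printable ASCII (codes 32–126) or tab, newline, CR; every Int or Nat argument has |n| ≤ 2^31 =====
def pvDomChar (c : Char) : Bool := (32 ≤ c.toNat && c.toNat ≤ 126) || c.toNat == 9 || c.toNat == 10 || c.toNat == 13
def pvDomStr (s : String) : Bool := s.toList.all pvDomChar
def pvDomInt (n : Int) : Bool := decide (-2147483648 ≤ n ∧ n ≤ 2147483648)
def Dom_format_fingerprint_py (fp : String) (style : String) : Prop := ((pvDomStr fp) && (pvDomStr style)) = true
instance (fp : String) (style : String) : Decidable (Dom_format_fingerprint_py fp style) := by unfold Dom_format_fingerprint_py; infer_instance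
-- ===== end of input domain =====

-- B builds the colon-separated string in one enumerate pass instead of slicing pairs and joining (alternative decomposition, same cost).

-- ===== PORT A =====
def format_fingerprint_py (fp : String) (style : String) : String :=
  if style == "colon-upper" then
    let fp := PySem.Str.upper fp
    PySem.Str.join ":" ((PySem.List.pyRange 0 (PySem.Str.len fp) 2).map
      (fun i => PySem.Str.slice fp (some i) (some (i + 2))))
  else if style == "colon-lower" then
    let fp := PySem.Str.lower fp
    PySem.Str.join ":" ((PySem.List.pyRange 0 (PySem.Str.len fp) 2).map
      (fun i => PySem.Str.slice fp (some i) (some (i + 2))))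
  else if style == "upper" then
    PySem.Str.upper fp
  else if style == "lower" then
    PySem.Str.lower fp
  else
    fp

-- ===== PORT B =====
-- B's loop body: before an even index > 0, append ':'; then append the char
def pvAltStep (acc : List Char) (p : Int × Char) : List Char :=
  (if decide (0 < p.1) && decide (PySem.Int.mod p.1 2 = 0) then acc ++ [':'] else acc) ++ [p.2]

def format_fingerprint_py_alt (fp : String) (style : String) : String :=
  if style == "colon-upper" || style == "colon-lower" then
    let cased := if style == "colon-upper" then PySem.Str.upper fp else PySem.Str.lower fp
    String.ofList ((PySem.List.enumerate cased.toList 0).foldl pvAltStep [])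
  else if style == "upper" then
    PySem.Str.upper fp
  else if style == "lower" then
    PySem.Str.lower fp
  else
    fp

-- ===== PRECONDITION & SPEC =====
def Spec_format_fingerprint_py (fp : String) (style : String) (out : String) : Prop := out = format_fingerprint_py_alt fp style
instance (fp : String) (style : String) (out : String) : Decidable (Spec_format_fingerprint_py fp style out) := by unfold Spec_format_fingerprint_py; infer_instance

-- ===== CLAIM (what is proved, stated in full; the proofs are below) =====
def Claim_equal_format_fingerprint_py : Prop := ∀ (fp : String) (style : String), Dom_format_fingerprint_py fp style → Spec_format_fingerprint_py fp style (format_fingerprint_py fp style)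

-- ===== LEMMAS AND PROOFS =====

-- proof-only helper: the list of 2-char chunks of cs
def pvChunk2 : List Char → List (List Char)
  | [] => []
  | [c] => [[c]]
  | c1 :: c2 :: rest => [c1, c2] :: pvChunk2 rest

theorem pvRange_pos_cons (a b s : Int) (hs : 0 < s) (hab : a < b) :
    PySem.List.pyRange a b s = a :: PySem.List.pyRange (a + s) b s := by
  rw [PySem.List.pyRange_of_pos _ _ hs, PySem.List.pyRange_of_pos _ _ hs]
  rw [if_pos hab]
  by_cases h : a + s < b
  · rw [if_pos h]
    have key : ((b - a + s - 1) / s).toNat = ((b - (a + s) + s - 1) / s).toNat + 1 := by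
      have e : b - a + s - 1 = (b - (a + s) + s - 1) + 1 * s := by ring
      rw [e, Int.add_mul_ediv_right _ _ (by omega : s ≠ 0)]
      have h0 : 0 ≤ (b - (a + s) + s - 1) / s := Int.ediv_nonneg (by omega) (by omega)
      omega
    rw [key, List.range_succ_eq_map]
    simp only [List.map_cons, List.map_map, Nat.cast_zero, mul_zero, add_zero]
    congr 1
    apply List.map_congr_left
    intro k _; simp [Function.comp]; ring
  · rw [if_neg h]
    have key : (b - a + s - 1) / s = 1 := by
      have e : b - a + s - 1 = (b - a - 1) + 1 * s := by ring
      rw [e, Int.add_mul_ediv_right _ _ (by omega : s ≠ 0)]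
      rw [Int.ediv_eq_zero_of_lt (by omega) (by omega)]
      norm_num
    rw [key]
    simp

theorem pvRange_shift (a b c s : Int) (hs : 0 < s) :
    PySem.List.pyRange (a + c) (b + c) s = (PySem.List.pyRange a b s).map (· + c) := by
  rw [PySem.List.pyRange_of_pos _ _ hs, PySem.List.pyRange_of_pos _ _ hs]
  have e2 : (a + c < b + c) ↔ (a < b) := by omega
  rw [List.map_map]
  by_cases hab : a < b
  · rw [if_pos (e2.mpr hab), if_pos hab]
    have e1 : b + c - (a + c) + s - 1 = b - a + s - 1 := by ring
    rw [e1]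
    congr 1
    funext k; simp [Function.comp]; ring
  · rw [if_neg (fun hh => hab (e2.mp hh)), if_neg hab]; simp

theorem pvA_chunks (cs : List Char) :
    (PySem.List.pyRange 0 (cs.length : Int) 2).map
      (fun i => PySem.List.slice cs (some i) (some (i + 2))) = pvChunk2 cs := by
  induction cs using pvChunk2.induct with
  | case1 =>
    simp [pvChunk2, PySem.List.pyRange_of_pos 0 0 (by norm_num : (0:Int) < 2)]
  | case2 c =>
    rw [pvRange_pos_cons 0 _ 2 (by norm_num) (by norm_num)]
    rw [PySem.List.pyRange_of_pos _ _ (by norm_num : (0:Int) < 2)]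
    rw [if_neg (by norm_num)]
    rw [List.range_zero, List.map_nil, List.map_cons, List.map_nil]
    rw [PySem.List.slice_toNat _ le_rfl (by norm_num)]
    simp [pvChunk2]
  | case3 c1 c2 rest ih =>
    have hlen : ((c1 :: c2 :: rest).length : Int) = (rest.length : Int) + 2 := by
      simp; ring
    rw [hlen, pvRange_pos_cons 0 _ 2 (by norm_num) (by positivity)]
    have hshift : PySem.List.pyRange (0 + 2) ((rest.length : Int) + 2) 2
        = (PySem.List.pyRange 0 (rest.length : Int) 2).map (· + 2) :=
      pvRange_shift 0 _ 2 2 (by norm_num)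
    rw [hshift, List.map_cons, List.map_map, pvChunk2]
    refine List.cons_eq_cons.mpr ⟨?_, ?_⟩
    · rw [PySem.List.slice_toNat _ le_rfl (by norm_num)]
      simp
    · rw [← ih]
      apply List.map_congr_left
      intro j hj
      have hj0 : 0 ≤ j := by
        have := (PySem.List.mem_pyRange_iff_of_pos (by norm_num : (0:Int) < 2) j).mp hj
        omega
      simp only [Function.comp]
      rw [PySem.List.slice_toNat _ (by omega) (by omega),
          PySem.List.slice_toNat _ hj0 (by omega)]
      have e1 : (j + 2 + 2).toNat = j.toNat + 4 := by omega
      have e2 : (j + 2).toNat = j.toNat + 2 := by omega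
      rw [e1, e2]
      simp [List.drop_succ_cons]

theorem pvJoin_colon (l : List Char) (ls : List (List Char)) :
    PySem.Chars.join [':'] (l :: ls) = l ++ (ls.map (fun p => ':' :: p)).flatten := by
  induction ls generalizing l with
  | nil => simp [PySem.Chars.join_singleton]
  | cons q qs ih =>
    rw [PySem.Chars.join_cons_cons, ih q]
    simp

theorem pvmod_even (k : Int) : PySem.Int.mod (2 * k) 2 = 0 := by
  rw [PySem.Int.mod_eq_emod_of_pos (by norm_num)]; omega

theorem pvmod_odd (k : Int) : PySem.Int.mod (2 * k + 1) 2 = 1 := by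
  rw [PySem.Int.mod_eq_emod_of_pos (by norm_num)]; omega

theorem pvAltStep_eq (acc : List Char) (c : Char) (i : Int) :
    pvAltStep acc (i, c)
      = if 0 < i ∧ PySem.Int.mod i 2 = 0 then acc ++ [':', c] else acc ++ [c] := by
  simp only [pvAltStep]
  split_ifs with h1 h2 h3 <;> simp_all

theorem pvB_tail (cs : List Char) (k : Int) (hk : 0 ≤ k) (acc : List Char) :
    (PySem.List.enumerate cs (2 * (k + 1))).foldl pvAltStep acc
      = acc ++ ((pvChunk2 cs).map (fun p => ':' :: p)).flatten := by
  induction cs using pvChunk2.induct generalizing k acc with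
  | case1 => simp [pvChunk2, PySem.List.enumerate_nil]
  | case2 c =>
    rw [PySem.List.enumerate_cons, PySem.List.enumerate_nil]
    simp only [List.foldl_cons, List.foldl_nil]
    rw [pvAltStep_eq, if_pos ⟨by omega, pvmod_even (k + 1)⟩]
    simp [pvChunk2]
  | case3 c1 c2 rest ih =>
    rw [PySem.List.enumerate_cons, PySem.List.enumerate_cons]
    simp only [List.foldl_cons]
    rw [pvAltStep_eq (pvAltStep acc (2 * (k + 1), c1)),
        if_neg (by rintro ⟨-, h⟩; rw [pvmod_odd (k + 1)] at h; omega)]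
    rw [pvAltStep_eq, if_pos ⟨by omega, pvmod_even (k + 1)⟩]
    have e : 2 * (k + 1) + 1 + 1 = 2 * ((k + 1) + 1) := by ring
    rw [e, ih (k + 1) (by omega)]
    simp [pvChunk2]

theorem pvAB (cs : List Char) :
    PySem.Chars.join [':'] (pvChunk2 cs) = (PySem.List.enumerate cs 0).foldl pvAltStep [] := by
  rcases cs with _ | ⟨c1, _ | ⟨c2, rest⟩⟩
  · simp [pvChunk2, PySem.Chars.join_nil, PySem.List.enumerate_nil]
  · rw [PySem.List.enumerate_cons, PySem.List.enumerate_nil]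
    simp only [List.foldl_cons, List.foldl_nil]
    rw [pvAltStep_eq, if_neg (by rintro ⟨h, -⟩; omega)]
    simp [pvChunk2, PySem.Chars.join_singleton]
  · rw [PySem.List.enumerate_cons, PySem.List.enumerate_cons]
    simp only [List.foldl_cons]
    rw [pvAltStep_eq (pvAltStep [] ((0:Int), c1)),
        if_neg (by rintro ⟨-, h⟩
                   rw [show ((0:Int) + 1) = 2 * 0 + 1 by ring, pvmod_odd 0] at h; omega)]
    rw [pvAltStep_eq, if_neg (by rintro ⟨h, -⟩; omega)]
    have e : (0:Int) + 1 + 1 = 2 * (0 + 1) := by ring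
    rw [e, pvB_tail rest 0 le_rfl]
    rw [pvChunk2, pvJoin_colon]
    simp

theorem pvColon_eq (s : String) :
    PySem.Str.join ":" ((PySem.List.pyRange 0 (PySem.Str.len s) 2).map
      (fun i => PySem.Str.slice s (some i) (some (i + 2))))
    = String.ofList ((PySem.List.enumerate s.toList 0).foldl pvAltStep []) := by
  apply String.toList_inj.mp
  rw [PySem.Str.toList_join]
  simp only [List.map_map, Function.comp_def]
  simp only [PySem.Str.toList_slice, PySem.Chars.slice_eq_listSlice]
  rw [PySem.Str.len_eq]
  rw [show ":".toList = [':'] from rfl, pvA_chunks s.toList, pvAB s.toList]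
  simp [String.toList_ofList]

-- ===== VERDICT (by name: the statement is the Claim_ definition above) =====
theorem format_fingerprint_py_spec : Claim_equal_format_fingerprint_py := by
  intro fp style _
  unfold Spec_format_fingerprint_py format_fingerprint_py format_fingerprint_py_alt
  by_cases h1 : style == "colon-upper"
  · simp only [h1, Bool.true_or, if_true]
    simpa using pvColon_eq (PySem.Str.upper fp)
  · by_cases h2 : style == "colon-lower"
    · simp only [h1, h2, if_true, Bool.or_true]
      simpa using pvColon_eq (PySem.Str.lower fp)
    · simp [h1, h2]
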